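-- pv_equiv track=rewrite | github.com/metacapsin/Emr-Calendar-Model | src/database/queries.py | _build_time_bucket_profile
-- ===== SOURCE A (Python) =====
-- from typing import Any, Dict, List, Optional, Tuple
--
-- def _build_time_bucket_profile(appts: List[Dict[str, Any]]) -> Dict[str, int]:
--     buckets = {"patient_pref_morning": 0, "patient_pref_midday": 0, "patient_pref_afternoon": 0, "patient_pref_evening": 0}
--     for appt in appts:
--         hour = appt.get("appt_hour")
--         if hour is None:
--             continue
--         try:
--             hour = int(hour)
--         except (ValueError, TypeError):
--             continue
--         if 6 <= hour < 11:
--             buckets["patient_pref_morning"] += 1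
--         elif 11 <= hour < 14:
--             buckets["patient_pref_midday"] += 1
--         elif 14 <= hour < 18:
--             buckets["patient_pref_afternoon"] += 1
--         elif 18 <= hour < 22:
--             buckets["patient_pref_evening"] += 1
--     if sum(buckets.values()) == 0:
--         buckets["patient_pref_morning"] = 1
--     return buckets
-- ===== SOURCE B (Python) =====
-- def _build_time_bucket_profile(appts):
--     hours = []
--     for appt in appts:
--         h = appt.get("appt_hour")
--         if h is None:
--             continue
--         try:
--             hours.append(int(h))
--         except (ValueError, TypeError):
--             continue
--     def cnt(lo, hi):
--         return sum(1 for h in hours if lo <= h < hi)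
--     m, mi, a, e = cnt(6, 11), cnt(11, 14), cnt(14, 18), cnt(18, 22)
--     if m + mi + a + e == 0:
--         m = 1
--     return {"patient_pref_morning": m, "patient_pref_midday": mi,
--             "patient_pref_afternoon": a, "patient_pref_evening": e}
-- ===== Notes on version B (the rewrite author's own statement) =====
-- stated objective: alternative
-- what changed: Replaces the single loop that increments four dict counters branch-by-branch with a hour-extraction pass followed by four independent range counts (sum of generator per bucket), assembling the result dict once at the end.
import Mathlib
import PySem

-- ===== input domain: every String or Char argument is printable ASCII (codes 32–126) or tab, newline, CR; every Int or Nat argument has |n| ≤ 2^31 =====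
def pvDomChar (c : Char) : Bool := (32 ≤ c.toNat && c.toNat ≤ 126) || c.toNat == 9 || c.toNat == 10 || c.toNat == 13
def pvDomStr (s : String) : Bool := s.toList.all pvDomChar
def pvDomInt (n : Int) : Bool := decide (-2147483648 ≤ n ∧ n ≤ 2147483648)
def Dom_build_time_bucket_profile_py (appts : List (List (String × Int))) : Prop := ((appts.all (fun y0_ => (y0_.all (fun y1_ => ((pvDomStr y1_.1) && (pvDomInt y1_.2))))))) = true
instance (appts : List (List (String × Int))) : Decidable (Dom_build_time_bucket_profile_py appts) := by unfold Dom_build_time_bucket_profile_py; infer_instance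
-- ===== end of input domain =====

-- B replaces A's single increment-per-branch loop by an hour-extraction pass plus four
-- independent range counts (objective: alternative decomposition, same O(n) cost).

-- ===== PORT A =====
-- A's loop: one pass, incrementing one of four counters per appointment (the dict's
-- four fixed keys are carried as four accumulators; int(hour) is the identity on Int).
def bt_loop : List (List (String × Int)) → Int → Int → Int → Int → Int × Int × Int × Int
  | [], m, mi, a, e => (m, mi, a, e)
  | appt :: rest, m, mi, a, e =>
    match (PySem.Dict.mk appt).get? "appt_hour" with
    | none => bt_loop rest m mi a e
    | some h =>
      if 6 ≤ h ∧ h < 11 then bt_loop rest (m + 1) mi a e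
      else if 11 ≤ h ∧ h < 14 then bt_loop rest m (mi + 1) a e
      else if 14 ≤ h ∧ h < 18 then bt_loop rest m mi (a + 1) e
      else if 18 ≤ h ∧ h < 22 then bt_loop rest m mi a (e + 1)
      else bt_loop rest m mi a e

def build_time_bucket_profile_py (appts : List (List (String × Int))) : List (String × Int) :=
  let r := bt_loop appts 0 0 0 0
  if r.1 + r.2.1 + r.2.2.1 + r.2.2.2 = 0 then
    [("patient_pref_morning", 1), ("patient_pref_midday", r.2.1),
     ("patient_pref_afternoon", r.2.2.1), ("patient_pref_evening", r.2.2.2)]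
  else
    [("patient_pref_morning", r.1), ("patient_pref_midday", r.2.1),
     ("patient_pref_afternoon", r.2.2.1), ("patient_pref_evening", r.2.2.2)]

-- ===== PORT B =====
-- sum(1 for h in hours if lo <= h < hi)
def bt_cnt (lo hi : Int) (hours : List Int) : Int :=
  hours.foldl (fun n h => if lo ≤ h ∧ h < hi then n + 1 else n) 0

def build_time_bucket_profile_py_alt (appts : List (List (String × Int))) : List (String × Int) :=
  let hours := appts.filterMap (fun appt => (PySem.Dict.mk appt).get? "appt_hour")
  let m := bt_cnt 6 11 hours
  let mi := bt_cnt 11 14 hours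
  let a := bt_cnt 14 18 hours
  let e := bt_cnt 18 22 hours
  let m := if m + mi + a + e = 0 then 1 else m
  [("patient_pref_morning", m), ("patient_pref_midday", mi),
   ("patient_pref_afternoon", a), ("patient_pref_evening", e)]

-- ===== PRECONDITION & SPEC =====
def Spec_build_time_bucket_profile_py (appts : List (List (String × Int))) (out : List (String × Int)) : Prop := out = build_time_bucket_profile_py_alt appts
instance (appts : List (List (String × Int))) (out : List (String × Int)) : Decidable (Spec_build_time_bucket_profile_py appts out) := by unfold Spec_build_time_bucket_profile_py; infer_instance

-- ===== CLAIM (what is proved, stated in full; the proofs are below) =====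
def Claim_equal_build_time_bucket_profile_py : Prop := ∀ (appts : List (List (String × Int))), Dom_build_time_bucket_profile_py appts → Spec_build_time_bucket_profile_py appts (build_time_bucket_profile_py appts)

-- ===== LEMMAS AND PROOFS =====

theorem bt_cnt_shift (lo hi : Int) (hours : List Int) (n : Int) :
    hours.foldl (fun n h => if lo ≤ h ∧ h < hi then n + 1 else n) n
      = n + bt_cnt lo hi hours := by
  induction hours generalizing n with
  | nil => simp [bt_cnt]
  | cons h t ih =>
    simp only [bt_cnt, List.foldl_cons]
    split_ifs with hc
    · rw [ih (n + 1), ih (0 + 1)]; ring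
    · rw [ih n, ih 0]; ring

theorem bt_cnt_cons (lo hi h : Int) (t : List Int) :
    bt_cnt lo hi (h :: t) = (if lo ≤ h ∧ h < hi then 1 else 0) + bt_cnt lo hi t := by
  rw [bt_cnt, List.foldl_cons, bt_cnt_shift]
  split_ifs <;> omega

theorem bt_loop_eq (appts : List (List (String × Int))) (m mi a e : Int) :
    bt_loop appts m mi a e =
      (m + bt_cnt 6 11 (appts.filterMap (fun appt => (PySem.Dict.mk appt).get? "appt_hour")),
       mi + bt_cnt 11 14 (appts.filterMap (fun appt => (PySem.Dict.mk appt).get? "appt_hour")),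
       a + bt_cnt 14 18 (appts.filterMap (fun appt => (PySem.Dict.mk appt).get? "appt_hour")),
       e + bt_cnt 18 22 (appts.filterMap (fun appt => (PySem.Dict.mk appt).get? "appt_hour"))) := by
  induction appts generalizing m mi a e with
  | nil => simp [bt_loop, bt_cnt]
  | cons appt rest ih =>
    simp only [bt_loop, List.filterMap_cons]
    cases hg : (PySem.Dict.mk appt).get? "appt_hour" with
    | none => simp [ih]
    | some h =>
      simp only [bt_cnt_cons]
      split_ifs with h1 h2 h3 h4 <;>
        rw [ih] <;> simp only [Prod.mk.injEq] <;>
        refine ⟨?_, ?_, ?_, ?_⟩ <;> omega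

-- ===== VERDICT (by name: the statement is the Claim_ definition above) =====
theorem build_time_bucket_profile_py_spec : Claim_equal_build_time_bucket_profile_py := by
  intro appts _
  unfold Spec_build_time_bucket_profile_py build_time_bucket_profile_py build_time_bucket_profile_py_alt
  simp only [bt_loop_eq, zero_add]
  split_ifs <;> rfl
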